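-- pv_equiv track=rewrite | github.com/RamiroAlarconLasagno/CodeMap | core/analyzer/regex_base.py | limpiar_js_ts
-- ===== SOURCE A (Python) =====
-- def limpiar_js_ts(codigo: str) -> str:
--     """Elimina strings y comentarios JS/TS para evitar falsos positivos en regex.
--
--     Maneja: '', "", `` (template literals), comentarios // y /* */
--     Preserva saltos de linea.
--     """
--     resultado = []
--     i = 0
--     n = len(codigo)
--
--     while i < n:
--         # Comentario de bloque
--         if codigo[i:i+2] == "/*":
--             fin = codigo.find("*/", i + 2)
--             if fin == -1:
--                 bloque = codigo[i:]
--                 resultado.append("\n" * bloque.count("\n"))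
--                 break
--             bloque = codigo[i:fin + 2]
--             resultado.append("\n" * bloque.count("\n"))
--             i = fin + 2
--
--         # Comentario de linea
--         elif codigo[i:i+2] == "//":
--             fin = codigo.find("\n", i)
--             if fin == -1:
--                 break
--             resultado.append("\n")
--             i = fin + 1
--
--         # Template literal con backtick — puede ser multilinea
--         elif codigo[i] == "`":
--             i += 1
--             while i < n:
--                 if codigo[i] == "\\" and i + 1 < n:
--                     i += 2
--                     continue
--                 if codigo[i] == "`":
--                     i += 1
--                     break
--                 if codigo[i] == "\n":
--                     resultado.append("\n")
--                 i += 1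
--
--         # String " o '
--         elif codigo[i] in ('"', "'"):
--             delim = codigo[i]
--             i += 1
--             while i < n:
--                 if codigo[i] == "\\" and i + 1 < n:
--                     i += 2
--                     continue
--                 if codigo[i] == delim:
--                     i += 1
--                     break
--                 if codigo[i] == "\n":
--                     resultado.append("\n")
--                 i += 1
--
--         else:
--             resultado.append(codigo[i])
--             i += 1
--
--     return "".join(resultado)
-- ===== SOURCE B (Python) =====
-- import re
--
-- # One alternation pattern: block comments (terminated, then unterminated fallback),
-- # line comments, then single/double/backtick-quoted strings with escape handling and
-- # an optional unterminated tail that also swallows a trailing lone backslash.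
-- _TOKEN = re.compile(
--     r"/\*[\s\S]*?\*/"
--     r"|/\*[\s\S]*"
--     r"|//[^\n]*\n?"
--     r"|'(?:\\[\s\S]|[^'\\])*(?:'|\\)?"
--     r"|\"(?:\\[\s\S]|[^\"\\])*(?:\"|\\)?"
--     r"|`(?:\\[\s\S]|[^`\\])*(?:`|\\)?"
-- )
--
-- _ESC = re.compile(r"\\[\s\S]")
--
--
-- def limpiar_js_ts(codigo: str) -> str:
--     """Elimina strings y comentarios JS/TS para evitar falsos positivos en regex.
--
--     Maneja: '', "", `` (template literals), comentarios // y /* */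
--     Preserva saltos de linea.
--     """
--     out = []
--     pos = 0
--     for m in _TOKEN.finditer(codigo):
--         out.append(codigo[pos:m.start()])
--         t = m.group(0)
--         if t[0] == '/':
--             out.append('\n' * t.count('\n'))
--         else:
--             # inside strings/templates an escaped newline is not a line break
--             out.append('\n' * _ESC.sub('', t).count('\n'))
--         pos = m.end()
--     out.append(codigo[pos:])
--     return ''.join(out)
-- ===== Notes on version B (the rewrite author's own statement) =====
-- stated objective: idiomatic
-- what changed: Replaces the hand-written index-driven scanner (nested while loops, str.find, per-character appends) with a single compiled regex alternation over all token kinds, driven by re.finditer, replacing each matched token by newlines counted in it (escape pairs stripped first for strings/templates).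
import Mathlib
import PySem

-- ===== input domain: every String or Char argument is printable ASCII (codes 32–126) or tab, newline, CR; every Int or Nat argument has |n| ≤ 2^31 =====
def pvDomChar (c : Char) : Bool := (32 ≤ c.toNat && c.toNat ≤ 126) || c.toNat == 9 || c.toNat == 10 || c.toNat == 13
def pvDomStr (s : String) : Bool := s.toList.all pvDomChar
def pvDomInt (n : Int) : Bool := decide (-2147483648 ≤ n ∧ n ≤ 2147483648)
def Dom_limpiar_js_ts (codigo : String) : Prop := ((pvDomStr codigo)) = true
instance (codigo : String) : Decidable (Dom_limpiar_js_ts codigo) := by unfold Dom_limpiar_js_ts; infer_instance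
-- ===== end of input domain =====

-- B replaces A's hand-written index scanner by a regex-alternation tokenizer (re.finditer);
-- same O(n) cost, more idiomatic. Equivalence is proved for every string (no Pre_).

-- ===== PORT A =====
-- shared low-level searches: codigo.find("*/", i+2) and codigo.find("\n", i) and "…".count("\n")
-- findStarSlash l = first index k with l[k]='*' and l[k+1]='/' (Python str.find of "*/")
def findStarSlash : List Char → Option Nat
  | [] => none
  | a :: r =>
    if a = '*' ∧ r.head? = some '/' then some 0
    else (findStarSlash r).map (· + 1)

-- findNl l = first index of '\n' (Python str.find of "\n")
def findNl : List Char → Option Nat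
  | [] => none
  | a :: r => if a = '\n' then some 0 else (findNl r).map (· + 1)

-- the inner `while` of A for string/template bodies: returns (emitted newlines, remaining input)
def strLoopA (delim : Char) : List Char → List Char × List Char
  | [] => ([], [])
  | a :: r =>
    if a = '\\' ∧ r ≠ [] then strLoopA delim r.tail      -- escaped char: i += 2
    else if a = delim then ([], r)                       -- closing delimiter: i += 1; break
    else if a = '\n' then
      let p := strLoopA delim r
      ('\n' :: p.1, p.2)                                 -- resultado.append("\n")
    else strLoopA delim r
  termination_by l => l.length
  decreasing_by all_goals (first | (simp; omega) | simp)


-- cited by goA's decreasing_by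
theorem strLoopA_snd_length_le (d : Char) (l : List Char) : (strLoopA d l).2.length ≤ l.length := by
  suffices h : ∀ (n : Nat) (l : List Char), l.length ≤ n → (strLoopA d l).2.length ≤ l.length from
    h l.length l le_rfl
  intro n
  induction n with
  | zero =>
    intro l hl
    have : l = [] := by cases l <;> simp_all
    simp [this, strLoopA]
  | succ n ih =>
    intro l hl
    cases l with
    | nil => simp [strLoopA]
    | cons a r =>
      rw [strLoopA]
      split_ifs with h1 h2 h3
      · have ht : r.tail.length ≤ r.length := by cases r <;> simp
        have := ih r.tail (by simp at hl; omega)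
        simp; omega
      · simp
      · have := ih r (by simp at hl; omega)
        simp; omega
      · have := ih r (by simp at hl; omega)
        simp; omega

-- A's main `while i < n` loop; resultado is kept as the flattened char list ("".join at the end)
def goA : List Char → List Char
  | [] => []
  | a :: rest =>
    if a = '/' ∧ rest.head? = some '*' then              -- codigo[i:i+2] == "/*"
      match findStarSlash rest.tail with
      | none => List.replicate ((a :: rest).count '\n') '\n'                 -- unterminated: break
      | some k =>
        List.replicate (((a :: rest).take (k + 4)).count '\n') '\n'
          ++ goA ((a :: rest).drop (k + 4))
    else if a = '/' ∧ rest.head? = some '/' then         -- codigo[i:i+2] == "//"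
      match findNl (a :: rest) with
      | none => []                                                            -- break
      | some j => '\n' :: goA ((a :: rest).drop (j + 1))
    else if a = '`' ∨ a = '\'' ∨ a = '"' then
      (strLoopA a rest).1 ++ goA (strLoopA a rest).2
    else a :: goA rest
  termination_by l => l.length
  decreasing_by all_goals (first | (simp; omega) | (have := strLoopA_snd_length_le a rest; simp; omega) | simp)

def limpiar_js_ts (codigo : String) : String := String.mk (goA codigo.toList)

-- ===== PORT B =====
-- regex body (?:\\[\s\S]|[^delim\\])* followed by optional (?:delim|\\): length it consumes
def bodyLen (delim : Char) : List Char → Nat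
  | [] => 0
  | a :: r =>
    if a = '\\' then
      match r with
      | [] => 1                                          -- trailing lone backslash: the (?:delim|\\)? tail
      | _ :: r' => 2 + bodyLen delim r'                  -- \\[\s\S]
    else if a = delim then 1                             -- closing delimiter
    else 1 + bodyLen delim r                             -- [^delim\\]

-- the length of the _TOKEN match starting exactly here, alternatives in the pattern's order
def tryToken (cs : List Char) : Option Nat :=
  match cs with
  | [] => none
  | a :: rest =>
    if a = '/' ∧ rest.head? = some '*' then
      some (match findStarSlash rest.tail with
            | some k => k + 4                            -- /\*[\s\S]*?\*/
            | none => cs.length)                         -- /\*[\s\S]*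
    else if a = '/' ∧ rest.head? = some '/' then
      some (match findNl rest.tail with
            | some j => j + 3                            -- //[^\n]*\n
            | none => cs.length)                         -- //[^\n]* with no newline left
    else if a = '`' ∨ a = '\'' ∨ a = '"' then some (1 + bodyLen a rest)
    else none

-- _ESC.sub('', t): drop every backslash-plus-next-char pair
def stripEsc : List Char → List Char
  | [] => []
  | a :: r =>
    if a = '\\' ∧ r ≠ [] then stripEsc r.tail
    else a :: stripEsc r
  termination_by l => l.length
  decreasing_by all_goals (first | (simp; omega) | simp)

-- the replacement for one matched token
def tokenRepl (t : List Char) : List Char :=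
  if t.head? = some '/' then List.replicate (t.count '\n') '\n'
  else List.replicate ((stripEsc t).count '\n') '\n'


-- cited by goB's decreasing_by
theorem tryToken_pos (cs : List Char) (len : Nat) (h : tryToken cs = some len) : 0 < len := by
  cases cs with
  | nil => simp [tryToken] at h
  | cons a rest =>
      rw [tryToken] at h
      split_ifs at h with h1 h2 h3 <;>
        first
          | (split at h <;> (simp at h; omega))
          | (simp at h; omega)
          | simp at h

-- the finditer loop: copy unmatched chars verbatim, replace each leftmost token match.
-- (exact for this pattern: every alternative is deterministic and at least one char long)
def goB : List Char → List Char
  | [] => []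
  | a :: rest =>
    match h : tryToken (a :: rest) with
    | some len => tokenRepl ((a :: rest).take len) ++ goB ((a :: rest).drop len)
    | none => a :: goB rest
  termination_by l => l.length
  decreasing_by all_goals (first | (have := tryToken_pos (a :: rest) len h; simp; omega) | simp)

def limpiar_js_ts_alt (codigo : String) : String := String.mk (goB codigo.toList)

-- ===== PRECONDITION & SPEC =====
def Spec_limpiar_js_ts (codigo : String) (out : String) : Prop := out = limpiar_js_ts_alt codigo
instance (codigo : String) (out : String) : Decidable (Spec_limpiar_js_ts codigo out) := by unfold Spec_limpiar_js_ts; infer_instance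

-- ===== CLAIM (what is proved, stated in full; the proofs are below) =====
def Claim_equal_limpiar_js_ts : Prop := ∀ (codigo : String), Dom_limpiar_js_ts codigo → Spec_limpiar_js_ts codigo (limpiar_js_ts codigo)

-- ===== LEMMAS AND PROOFS =====

theorem findNl_none_count (l : List Char) (h : findNl l = none) : l.count '\n' = 0 := by
  induction l with
  | nil => simp
  | cons a r ih =>
    rw [findNl] at h
    split_ifs at h with ha
    · have := ih (by simpa using h)
      simp [List.count_cons, this, ha]

theorem findNl_some_count (l : List Char) (j : Nat) (h : findNl l = some j) :
    (l.take (j + 1)).count '\n' = 1 := by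
  induction l generalizing j with
  | nil => simp [findNl] at h
  | cons a r ih =>
    rw [findNl] at h
    split_ifs at h with ha
    · simp only [Option.some.injEq] at h
      simp [← h, ha]
    · rcases Option.map_eq_some_iff.mp h with ⟨j', hj', rfl⟩
      simp [List.count_cons, ha, ih j' hj']

-- the regex string/template body consumes exactly what A's inner while loop consumes,
-- and counting newlines after stripping escape pairs equals what A's loop emits
theorem strLoopA_eq (d : Char) (hd1 : d ≠ '\\') (hd2 : d ≠ '\n') (r : List Char) :
    strLoopA d r =
      (List.replicate ((stripEsc (r.take (bodyLen d r))).count '\n') '\n',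
        r.drop (bodyLen d r)) := by
  suffices h : ∀ (n : Nat) (r : List Char), r.length ≤ n →
      strLoopA d r =
        (List.replicate ((stripEsc (r.take (bodyLen d r))).count '\n') '\n',
          r.drop (bodyLen d r)) from h r.length r le_rfl
  intro n
  induction n with
  | zero =>
    intro r hr
    have : r = [] := by cases r <;> simp_all
    simp [this, strLoopA, bodyLen, stripEsc]
  | succ n ih =>
    intro r hr
    cases r with
    | nil => simp [strLoopA, bodyLen, stripEsc]
    | cons a r' =>
      by_cases ha : a = '\\'
      · subst ha
        cases r' with
        | nil => simp [strLoopA, bodyLen, stripEsc, hd1.symm]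
        | cons b r'' =>
          have hx := ih r'' (by simp at hr; omega)
          have h2 : 2 + bodyLen d r'' = bodyLen d r'' + 1 + 1 := by omega
          simp [strLoopA, bodyLen, stripEsc, hx, h2]
      · by_cases had : a = d
        · subst had
          rw [strLoopA, bodyLen.eq_def]
          simp [ha, hd2, stripEsc, List.count_cons]
        · by_cases han : a = '\n'
          · have hx := ih r' (by simp at hr; omega)
            have h1 : 1 + bodyLen d r' = bodyLen d r' + 1 := by omega
            rw [strLoopA, bodyLen.eq_def]
            simp [ha, had, han, Ne.symm hd2, hx, h1, stripEsc, List.count_cons, List.replicate_succ]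
          · have hx := ih r' (by simp at hr; omega)
            have h1 : 1 + bodyLen d r' = bodyLen d r' + 1 := by omega
            rw [strLoopA, bodyLen.eq_def]
            simp [ha, had, han, Ne.symm hd2, hx, h1, stripEsc, List.count_cons]

theorem goB_some (cs : List Char) (len : Nat) (h : tryToken cs = some len) :
    goB cs = tokenRepl (cs.take len) ++ goB (cs.drop len) := by
  cases cs with
  | nil => simp [tryToken] at h
  | cons a rest =>
    rw [goB]
    split
    · rename_i len' heq
      rw [h] at heq
      cases heq
      rfl
    · rename_i heq
      rw [h] at heq
      cases heq

theorem goB_none (a : Char) (rest : List Char) (h : tryToken (a :: rest) = none) :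
    goB (a :: rest) = a :: goB rest := by
  rw [goB]
  split
  · rename_i len' heq
    rw [h] at heq
    cases heq
  · rfl

-- the two loops produce the same output
theorem goA_eq_goB (l : List Char) : goA l = goB l := by
  suffices h : ∀ (n : Nat) (l : List Char), l.length ≤ n → goA l = goB l from
    h l.length l le_rfl
  intro n
  induction n with
  | zero =>
    intro l hl
    have : l = [] := by cases l <;> simp_all
    simp [this, goA, goB]
  | succ n ih =>
    intro l hl
    cases l with
    | nil => simp [goA, goB]
    | cons a rest =>
      by_cases h1 : a = '/' ∧ rest.head? = some '*'
      · -- block comment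
        obtain ⟨rfl, hh⟩ := h1
        cases rest with
        | nil => simp at hh
        | cons b rest2 =>
          simp only [List.head?_cons, Option.some.injEq] at hh
          subst hh
          cases hf : findStarSlash rest2 with
          | none =>
            have htok : tryToken ('/' :: '*' :: rest2) = some (('/' :: '*' :: rest2).length) := by
              rw [tryToken]; simp [hf]
            rw [goB_some _ _ htok]
            rw [goA]
            simp [hf, tokenRepl, goB, List.count_cons]
          | some k =>
            have htok : tryToken ('/' :: '*' :: rest2) = some (k + 4) := by
              rw [tryToken]; simp [hf]
            rw [goB_some _ _ htok]
            rw [goA]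
            simp only [List.head?_cons, Option.some.injEq, List.tail_cons]
            rw [if_pos (by simp)]
            rw [hf]
            dsimp only
            rw [ih (('/' :: '*' :: rest2).drop (k + 4)) (by simp at hl ⊢; omega)]
            rw [tokenRepl]
            rw [if_pos (by simp [List.take_succ_cons])]
      · by_cases h2 : a = '/' ∧ rest.head? = some '/'
        · -- line comment
          obtain ⟨rfl, hh⟩ := h2
          cases rest with
          | nil => simp at hh
          | cons b rest2 =>
            simp only [List.head?_cons, Option.some.injEq] at hh
            subst hh
            cases hf : findNl rest2 with
            | none =>
              have htok : tryToken ('/' :: '/' :: rest2) = some (('/' :: '/' :: rest2).length) := by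
                rw [tryToken]; simp [hf]
              have hfc : findNl ('/' :: '/' :: rest2) = none := by
                rw [findNl]; simp only [if_neg (by decide : ¬('/' : Char) = '\n')]
                rw [findNl]; simp only [if_neg (by decide : ¬('/' : Char) = '\n')]
                simp [hf]
              rw [goB_some _ _ htok]
              rw [goA]
              simp [hfc, tokenRepl, goB, List.count_cons, findNl_none_count rest2 hf]
            | some j =>
              have htok : tryToken ('/' :: '/' :: rest2) = some (j + 3) := by
                rw [tryToken]; simp [hf]
              have hfc : findNl ('/' :: '/' :: rest2) = some (j + 2) := by
                rw [findNl]; simp only [if_neg (by decide : ¬('/' : Char) = '\n')]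
                rw [findNl]; simp only [if_neg (by decide : ¬('/' : Char) = '\n')]
                simp [hf]
              rw [goB_some _ _ htok]
              rw [goA]
              simp only [List.head?_cons, Option.some.injEq, List.tail_cons]
              rw [if_neg (by simp), if_pos (by simp)]
              rw [hfc]
              dsimp only
              have h3eq : j + 2 + 1 = j + 3 := by omega
              rw [h3eq]
              rw [ih (('/' :: '/' :: rest2).drop (j + 3)) (by simp at hl ⊢; omega)]
              rw [tokenRepl]
              rw [if_pos (by simp [List.take_succ_cons])]
              have hcnt : (('/' :: '/' :: rest2).take (j + 3)).count '\n' = 1 := by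
                have h4 : j + 3 = j + 1 + 1 + 1 := by omega
                rw [h4]
                simp [List.take_succ_cons, List.count_cons, findNl_some_count rest2 j hf]
              rw [hcnt]
              simp
        · by_cases h3 : a = '`' ∨ a = '\'' ∨ a = '"'
          · -- string / template literal
            have ha1 : a ≠ '\\' := by rcases h3 with rfl | rfl | rfl <;> decide
            have ha2 : a ≠ '\n' := by rcases h3 with rfl | rfl | rfl <;> decide
            have ha3 : a ≠ '/' := by rcases h3 with rfl | rfl | rfl <;> decide
            rw [goA]
            rw [if_neg (by rintro ⟨rfl, -⟩; exact ha3 rfl), if_neg (by rintro ⟨rfl, -⟩; exact ha3 rfl), if_pos h3]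
            have htok : tryToken (a :: rest) = some (1 + bodyLen a rest) := by
              rw [tryToken]
              rw [if_neg (by rintro ⟨rfl, -⟩; exact ha3 rfl), if_neg (by rintro ⟨rfl, -⟩; exact ha3 rfl), if_pos h3]
            rw [goB_some _ _ htok]
            rw [strLoopA_eq a ha1 ha2 rest]
            have h1B : 1 + bodyLen a rest = bodyLen a rest + 1 := by omega
            rw [tokenRepl]
            rw [h1B, List.take_succ_cons, List.drop_succ_cons]
            rw [if_neg (by simpa using ha3)]
            rw [stripEsc]
            rw [if_neg (by simp [ha1])]
            have hlen : ((strLoopA a rest).2).length ≤ rest.length := strLoopA_snd_length_le a rest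
            rw [strLoopA_eq a ha1 ha2 rest] at hlen
            rw [ih (rest.drop (bodyLen a rest)) (by simp at hl ⊢; omega)]
            simp [List.count_cons, ha2]
          · -- ordinary character
            rw [goA]
            rw [if_neg h1, if_neg h2, if_neg h3]
            have htok : tryToken (a :: rest) = none := by
              rw [tryToken]
              rw [if_neg h1, if_neg h2, if_neg h3]
            rw [goB_none _ _ htok]
            rw [ih rest (by simp at hl; omega)]

-- ===== VERDICT (by name: the statement is the Claim_ definition above) =====
theorem limpiar_js_ts_spec : Claim_equal_limpiar_js_ts := by
  intro codigo _
  unfold Spec_limpiar_js_ts limpiar_js_ts limpiar_js_ts_alt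
  rw [goA_eq_goB]
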